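-- pv_equiv track=rewrite | github.com/dzyla/seq_align | modules/pdb_renumber.py | get_mapping_from_alignment
-- ===== SOURCE A (Python) =====
-- def get_mapping_from_alignment(aligned_target, aligned_chain):
--     """
--     Given an alignment of target and chain, returns a dictionary mapping
--     the 0-based index of the chain's un-gapped sequence to the
--     1-based index of the target's un-gapped sequence.
--     """
--     mapping = {}
--     target_pos = 1
--     chain_pos = 0
--
--     for t_char, c_char in zip(aligned_target, aligned_chain):
--         if c_char != '-':
--             if t_char != '-':
--                 mapping[chain_pos] = target_pos
--             chain_pos += 1
--
--         if t_char != '-':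
--             target_pos += 1
--
--     return mapping
-- ===== SOURCE B (Python) =====
-- def _nongap_columns(s):
--     """Alignment columns (0-based) holding a non-gap character of s."""
--     return [col for col, ch in enumerate(s) if ch != '-']
--
--
-- def get_mapping_from_alignment(aligned_target, aligned_chain):
--     """
--     Given an alignment of target and chain, returns a dictionary mapping
--     the 0-based index of the chain's un-gapped sequence to the
--     1-based index of the target's un-gapped sequence.
--
--     Hash-join formulation: index the target's non-gap columns by column
--     number (column -> 1-based target position), then join the chain's
--     non-gap columns against that index.
--     """
--     target_pos_by_col = {col: pos
--                          for pos, col in enumerate(_nongap_columns(aligned_target), 1)}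
--     return {ci: target_pos_by_col[col]
--             for ci, col in enumerate(_nongap_columns(aligned_chain))
--             if col in target_pos_by_col}
-- ===== Notes on version B (the rewrite author's own statement) =====
-- stated objective: alternative
-- what changed: Replaces A's single zipped pass with twin running counters by a hash-join: it extracts each sequence's list of non-gap column numbers, builds a dictionary from target column to 1-based target position, and joins the enumerated chain columns against that index (no paired scan, no counters).
import Mathlib
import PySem

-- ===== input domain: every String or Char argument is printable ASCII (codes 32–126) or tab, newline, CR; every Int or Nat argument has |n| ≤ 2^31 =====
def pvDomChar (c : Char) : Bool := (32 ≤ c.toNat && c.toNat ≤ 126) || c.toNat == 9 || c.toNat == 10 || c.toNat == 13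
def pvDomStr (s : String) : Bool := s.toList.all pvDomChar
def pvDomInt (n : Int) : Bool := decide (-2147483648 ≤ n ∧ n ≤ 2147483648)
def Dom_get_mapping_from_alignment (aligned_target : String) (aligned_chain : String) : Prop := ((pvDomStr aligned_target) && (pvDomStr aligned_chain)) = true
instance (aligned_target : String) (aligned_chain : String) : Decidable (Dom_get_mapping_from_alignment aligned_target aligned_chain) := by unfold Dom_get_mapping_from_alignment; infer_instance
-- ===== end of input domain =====

-- B replaces A's zipped twin-counter pass by a hash-join: non-gap column lists, a column->target-position index, and a join; alternative decomposition, same values.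

-- ===== PORT A =====
-- the for-loop over zip(...) as structural recursion over the zipped char lists, carrying (mapping, target_pos, chain_pos)
def pvGoA : List (Char × Char) → PySem.Dict Int Int → Int → Int → PySem.Dict Int Int
  | [], mapping, _, _ => mapping
  | (t_char, c_char) :: rest, mapping, target_pos, chain_pos =>
    let (mapping, chain_pos) :=
      if c_char ≠ '-' then
        ((if t_char ≠ '-' then mapping.insert chain_pos target_pos else mapping), chain_pos + 1)
      else (mapping, chain_pos)
    let target_pos := if t_char ≠ '-' then target_pos + 1 else target_pos
    pvGoA rest mapping target_pos chain_pos

def get_mapping_from_alignment (aligned_target : String) (aligned_chain : String) : List (Int × Int) :=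
  (pvGoA (aligned_target.toList.zip aligned_chain.toList) PySem.Dict.empty 1 0).items

-- ===== PORT B =====
-- _nongap_columns: the comprehension [col for col, ch in enumerate(s) if ch != '-']
def pvNonGapCols (s : List Char) : List Int :=
  (PySem.List.enumerate s 0).filterMap (fun p => if p.2 ≠ '-' then some p.1 else none)

def get_mapping_from_alignment_alt (aligned_target : String) (aligned_chain : String) : List (Int × Int) :=
  let target_pos_by_col : List (Int × Int) :=
    (PySem.List.enumerate (pvNonGapCols aligned_target.toList) 1).map (fun p => (p.2, p.1))
  (PySem.List.enumerate (pvNonGapCols aligned_chain.toList) 0).filterMap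
    (fun p => match target_pos_by_col.lookup p.2 with
      | some v => some (p.1, v)
      | none => none)

-- ===== PRECONDITION & SPEC =====
def Spec_get_mapping_from_alignment (aligned_target : String) (aligned_chain : String) (out : List (Int × Int)) : Prop := out = get_mapping_from_alignment_alt aligned_target aligned_chain
instance (aligned_target : String) (aligned_chain : String) (out : List (Int × Int)) : Decidable (Spec_get_mapping_from_alignment aligned_target aligned_chain out) := by unfold Spec_get_mapping_from_alignment; infer_instance

-- ===== CLAIM (what is proved, stated in full; the proofs are below) =====
def Claim_equal_get_mapping_from_alignment : Prop := ∀ (aligned_target : String) (aligned_chain : String), Dom_get_mapping_from_alignment aligned_target aligned_chain → Spec_get_mapping_from_alignment aligned_target aligned_chain (get_mapping_from_alignment aligned_target aligned_chain)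

-- ===== LEMMAS AND PROOFS =====

-- canonical form: filter of the zipped columns with cumulative non-gap counts, to which both sides are reduced
def pvCumNongap : Int → List Char → List Int
  | _, [] => []
  | n, ch :: rest =>
    let n' := n + (if ch ≠ '-' then 1 else 0)
    n' :: pvCumNongap n' rest

def pvBGen (tl cl : List Char) (tb cb : Int) : List (Int × Int) :=
  ((pvCumNongap tb tl).zip ((pvCumNongap cb cl).zip (tl.zip cl))).filterMap
    (fun q => if q.2.2.1 ≠ '-' ∧ q.2.2.2 ≠ '-' then some (q.2.1 - 1, q.1) else none)

lemma pvGoA_items (tl cl : List Char) (m : PySem.Dict Int Int) (tpos cpos : Int)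
    (hkeys : ∀ k ∈ m.keys, k < cpos) :
    (pvGoA (tl.zip cl) m tpos cpos).items = m.items ++ pvBGen tl cl (tpos - 1) cpos := by
  induction tl generalizing cl m tpos cpos with
  | nil => simp [pvGoA, pvBGen, pvCumNongap]
  | cons t tl ih =>
    cases cl with
    | nil => simp [pvGoA, pvBGen, pvCumNongap]
    | cons c cl =>
      by_cases hc : c = '-' <;> by_cases ht : t = '-'
      · subst hc; subst ht
        simp only [List.zip_cons_cons, pvGoA]
        rw [if_neg (by simp), if_neg (by simp)]
        show (pvGoA (tl.zip cl) m tpos cpos).items = _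
        rw [ih cl m tpos cpos hkeys]
        simp [pvBGen, pvCumNongap]
      · subst hc
        simp only [List.zip_cons_cons, pvGoA]
        rw [if_neg (by simp), if_pos ht]
        show (pvGoA (tl.zip cl) m (tpos + 1) cpos).items = _
        rw [ih cl m (tpos + 1) cpos hkeys]
        simp [pvBGen, pvCumNongap, ht, add_sub_cancel_right, sub_add_cancel]
      · subst ht
        simp only [List.zip_cons_cons, pvGoA]
        rw [if_pos hc, if_neg (by simp), if_neg (by simp)]
        show (pvGoA (tl.zip cl) m tpos (cpos + 1)).items = _
        rw [ih cl m tpos (cpos + 1) (fun k hk => lt_trans (hkeys k hk) (by omega))]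
        simp [pvBGen, pvCumNongap, hc]
      · have hfresh : m.contains cpos = false := by
          rw [PySem.Dict.contains_eq_decide_mem_keys]
          simp only [decide_eq_false_iff_not]
          intro hmem; exact absurd (hkeys _ hmem) (lt_irrefl _)
        simp only [List.zip_cons_cons, pvGoA]
        rw [if_pos hc, if_pos ht, if_pos ht]
        show (pvGoA (tl.zip cl) (m.insert cpos tpos) (tpos + 1) (cpos + 1)).items = _
        rw [ih cl (m.insert cpos tpos) (tpos + 1) (cpos + 1)
            (fun k hk => by
              rcases (PySem.Dict.mem_keys_insert m cpos k tpos).mp hk with h | h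
              · omega
              · exact lt_trans (hkeys k h) (by omega))]
        rw [PySem.Dict.items_insert_of_not_contains m tpos hfresh]
        simp [pvBGen, pvCumNongap, hc, ht, add_sub_cancel_right, sub_add_cancel]

-- B-side: non-gap columns with an arbitrary column base, and the join, generalized
def pvColsFrom (s : List Char) (i : Int) : List Int :=
  (PySem.List.enumerate s i).filterMap (fun p => if p.2 ≠ '-' then some p.1 else none)

lemma pvColsFrom_cons (x : Char) (s : List Char) (i : Int) :
    pvColsFrom (x :: s) i =
      if x ≠ '-' then i :: pvColsFrom s (i + 1) else pvColsFrom s (i + 1) := by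
  by_cases hx : x = '-' <;> simp [pvColsFrom, PySem.List.enumerate_cons, hx]

lemma mem_pvColsFrom_ge (s : List Char) (i j : Int) (hj : j ∈ pvColsFrom s i) : i ≤ j := by
  induction s generalizing i with
  | nil => simp [pvColsFrom, PySem.List.enumerate_nil] at hj
  | cons x s ih =>
    rw [pvColsFrom_cons] at hj
    by_cases hx : x = '-'
    · rw [if_neg (by simp [hx])] at hj
      have := ih (i + 1) hj; omega
    · rw [if_pos hx] at hj
      rcases List.mem_cons.mp hj with h | h
      · omega
      · have := ih (i + 1) h; omega

def pvJ (tl cl : List Char) (col e tpos : Int) : List (Int × Int) :=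
  (PySem.List.enumerate (pvColsFrom cl col) e).filterMap
    (fun p =>
      match ((PySem.List.enumerate (pvColsFrom tl col) tpos).map (fun q => (q.2, q.1))).lookup p.2 with
      | some v => some (p.1, v)
      | none => none)

lemma lookup_map_enum_of_ge (cols : List Int) (s k : Int) (hk : ∀ j ∈ cols, k < j) :
    ((PySem.List.enumerate cols s).map (fun q => (q.2, q.1))).lookup k = none := by
  induction cols generalizing s with
  | nil => simp [PySem.List.enumerate_nil]
  | cons a cols ih =>
    have ha : k ≠ a := by have := hk a (by simp); omega
    simp only [PySem.List.enumerate_cons, List.map_cons, List.lookup]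
    rw [show (k == a) = false from beq_eq_false_iff_ne.mpr ha]
    exact ih (s + 1) (fun j hj => hk j (by simp [hj]))

lemma pvJ_eq_pvBGen (cl tl : List Char) (col e tpos : Int) :
    pvJ tl cl col e tpos = pvBGen tl cl (tpos - 1) e := by
  induction cl generalizing tl col e tpos with
  | nil =>
    simp [pvJ, pvColsFrom, PySem.List.enumerate_nil, pvBGen, pvCumNongap]
  | cons c cl ih =>
    cases tl with
    | nil =>
      -- no target columns: every lookup misses, the join is empty
      have : ∀ p ∈ PySem.List.enumerate (pvColsFrom (c :: cl) col) e,
          (match ((PySem.List.enumerate (pvColsFrom ([] : List Char) col) tpos).map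
              (fun q => (q.2, q.1))).lookup p.2 with
            | some v => some (p.1, v)
            | none => none) = (none : Option (Int × Int)) := by
        intro p _
        simp [pvColsFrom, PySem.List.enumerate_nil]
      rw [pvJ, List.filterMap_congr this]
      simp [pvBGen, pvCumNongap]
    | cons t tl =>
      have hskip : ∀ (v : Int) (L : List (Int × Int)) (p : Int × Int),
          p.2 ∈ pvColsFrom cl (col + 1) → (((col, v) :: L).lookup p.2) = L.lookup p.2 := by
        intro v L p hp
        have := mem_pvColsFrom_ge cl (col + 1) p.2 hp
        simp only [List.lookup]
        rw [show (p.2 == col) = false from beq_eq_false_iff_ne.mpr (by omega)]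
      by_cases hc : c = '-' <;> by_cases ht : t = '-'
      · -- both gaps
        subst hc; subst ht
        rw [pvJ, pvColsFrom_cons, pvColsFrom_cons]
        rw [if_neg (fun h => h rfl), if_neg (fun h => h rfl)]
        rw [show ((PySem.List.enumerate (pvColsFrom cl (col+1)) e).filterMap
          (fun p => match ((PySem.List.enumerate (pvColsFrom tl (col+1)) tpos).map (fun q => (q.2, q.1))).lookup p.2 with
            | some v => some (p.1, v) | none => none)) = pvJ tl cl (col+1) e tpos from rfl]
        rw [ih tl (col + 1) e tpos]
        simp [pvBGen, pvCumNongap]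
      · -- chain gap, target column: skip the head of the index
        subst hc
        rw [pvJ, pvColsFrom_cons, pvColsFrom_cons]
        rw [if_pos ht, if_neg (fun h => h rfl)]
        rw [PySem.List.enumerate_cons, List.map_cons]
        simp only
        have hcongr : ∀ p ∈ PySem.List.enumerate (pvColsFrom cl (col + 1)) e,
            (match (((col, tpos) :: (PySem.List.enumerate (pvColsFrom tl (col+1)) (tpos+1)).map (fun q => (q.2, q.1))).lookup p.2) with
              | some v => some (p.1, v) | none => none)
            = (match ((PySem.List.enumerate (pvColsFrom tl (col+1)) (tpos+1)).map (fun q => (q.2, q.1))).lookup p.2 with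
              | some v => some (p.1, v) | none => none) := by
          intro p hp
          have hp2 : p.2 ∈ pvColsFrom cl (col + 1) := by
            rcases (PySem.List.mem_enumerate_iff _ _ _).mp hp with ⟨k, hk, rfl⟩
            exact List.getElem_mem hk
          rw [hskip tpos _ p hp2]
        rw [List.filterMap_congr hcongr]
        rw [show ((PySem.List.enumerate (pvColsFrom cl (col+1)) e).filterMap
          (fun p => match ((PySem.List.enumerate (pvColsFrom tl (col+1)) (tpos+1)).map (fun q => (q.2, q.1))).lookup p.2 with
            | some v => some (p.1, v) | none => none)) = pvJ tl cl (col+1) e (tpos+1) from rfl]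
        rw [ih tl (col + 1) e (tpos + 1)]
        simp [pvBGen, pvCumNongap, ht, add_sub_cancel_right, sub_add_cancel]
      · -- chain column, target gap: the head lookup misses
        subst ht
        rw [pvJ, pvColsFrom_cons, pvColsFrom_cons]
        rw [if_neg (fun h => h rfl), if_pos hc]
        rw [PySem.List.enumerate_cons, List.filterMap_cons]
        simp only
        have hmiss : ((PySem.List.enumerate (pvColsFrom tl (col+1)) tpos).map (fun q => (q.2, q.1))).lookup col = none := by
          exact lookup_map_enum_of_ge _ tpos col
            (fun j hj => by have := mem_pvColsFrom_ge tl (col + 1) j hj; omega)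
        rw [show (((PySem.List.enumerate (pvColsFrom tl (col+1)) tpos).map (fun q => (q.2, q.1))).lookup ((e, col) : Int × Int).2) = none from hmiss]
        rw [show ((PySem.List.enumerate (pvColsFrom cl (col+1)) (e+1)).filterMap
          (fun p => match ((PySem.List.enumerate (pvColsFrom tl (col+1)) tpos).map (fun q => (q.2, q.1))).lookup p.2 with
            | some v => some (p.1, v) | none => none)) = pvJ tl cl (col+1) (e+1) tpos from rfl]
        rw [ih tl (col + 1) (e + 1) tpos]
        simp [pvBGen, pvCumNongap, hc]
      · -- match column: the head lookup hits with the head target position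
        rw [pvJ, pvColsFrom_cons, pvColsFrom_cons]
        rw [if_pos ht, if_pos hc]
        rw [PySem.List.enumerate_cons, List.map_cons, PySem.List.enumerate_cons, List.filterMap_cons]
        simp only
        have hhit : (((col, tpos) :: (PySem.List.enumerate (pvColsFrom tl (col+1)) (tpos+1)).map (fun q => (q.2, q.1))).lookup ((e, col) : Int × Int).2) = some tpos := by
          simp [List.lookup]
        rw [hhit]
        have hcongr : ∀ p ∈ PySem.List.enumerate (pvColsFrom cl (col + 1)) (e + 1),
            (match (((col, tpos) :: (PySem.List.enumerate (pvColsFrom tl (col+1)) (tpos+1)).map (fun q => (q.2, q.1))).lookup p.2) with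
              | some v => some (p.1, v) | none => none)
            = (match ((PySem.List.enumerate (pvColsFrom tl (col+1)) (tpos+1)).map (fun q => (q.2, q.1))).lookup p.2 with
              | some v => some (p.1, v) | none => none) := by
          intro p hp
          have hp2 : p.2 ∈ pvColsFrom cl (col + 1) := by
            rcases (PySem.List.mem_enumerate_iff _ _ _).mp hp with ⟨k, hk, rfl⟩
            exact List.getElem_mem hk
          rw [hskip tpos _ p hp2]
        rw [List.filterMap_congr hcongr]
        rw [show ((PySem.List.enumerate (pvColsFrom cl (col+1)) (e+1)).filterMap
          (fun p => match ((PySem.List.enumerate (pvColsFrom tl (col+1)) (tpos+1)).map (fun q => (q.2, q.1))).lookup p.2 with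
            | some v => some (p.1, v) | none => none)) = pvJ tl cl (col+1) (e+1) (tpos+1) from rfl]
        rw [ih tl (col + 1) (e + 1) (tpos + 1)]
        simp [pvBGen, pvCumNongap, hc, ht, add_sub_cancel_right, sub_add_cancel]

lemma alt_eq_pvJ (t c : String) :
    get_mapping_from_alignment_alt t c = pvJ t.toList c.toList 0 0 1 := rfl

-- ===== VERDICT (by name: the statement is the Claim_ definition above) =====
theorem get_mapping_from_alignment_spec : Claim_equal_get_mapping_from_alignment := by
  intro t c _
  unfold Spec_get_mapping_from_alignment get_mapping_from_alignment
  rw [pvGoA_items _ _ _ _ _ (by simp [PySem.Dict.keys_empty])]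
  rw [alt_eq_pvJ, pvJ_eq_pvBGen]
  norm_num
  rfl
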